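-- pv_equiv track=rewrite | github.com/Johann-Foerster/erdlinge-scripts | kontoabgleich_paypal.py | abgleich
-- ===== SOURCE A (Python) =====
-- from collections import defaultdict
--
-- def abgleich(pp_buchungen, bh_buchungen):
--     """Matcht Buchungen anhand (Datum, Betrag). Gibt drei Listen zurück."""
--
--     pp_map = defaultdict(list)
--     for datum, betrag, betreff in pp_buchungen:
--         pp_map[(datum, betrag)].append(betreff)
--
--     bh_map = defaultdict(list)
--     for datum, betrag, betreff in bh_buchungen:
--         bh_map[(datum, betrag)].append(betreff)
--
--     alle_keys = set(pp_map.keys()) | set(bh_map.keys())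
--
--     uebereinstimmend = []
--     nur_pp = []
--     nur_bh = []
--
--     for key in sorted(alle_keys):
--         datum, betrag = key
--         pp_liste = pp_map.get(key, [])
--         bh_liste = bh_map.get(key, [])
--
--         anzahl_match = min(len(pp_liste), len(bh_liste))
--
--         for i in range(anzahl_match):
--             uebereinstimmend.append((datum, betrag, pp_liste[i], bh_liste[i]))
--
--         for i in range(anzahl_match, len(pp_liste)):
--             nur_pp.append((datum, betrag, pp_liste[i], ""))
--
--         for i in range(anzahl_match, len(bh_liste)):
--             nur_bh.append((datum, betrag, "", bh_liste[i]))
--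
--     return nur_pp, nur_bh, uebereinstimmend
-- ===== SOURCE B (Python) =====
-- def abgleich(pp_buchungen, bh_buchungen):
--     """Matcht Buchungen anhand (Datum, Betrag). Gibt drei Listen zurück."""
--     keys = sorted({(d, b) for d, b, _ in pp_buchungen}
--                   | {(d, b) for d, b, _ in bh_buchungen})
--     nur_pp, nur_bh, uebereinstimmend = [], [], []
--     for d, b in keys:
--         pp = [t for dd, bb, t in pp_buchungen if (dd, bb) == (d, b)]
--         bh = [t for dd, bb, t in bh_buchungen if (dd, bb) == (d, b)]
--         m = min(len(pp), len(bh))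
--         uebereinstimmend += [(d, b, p, q) for p, q in zip(pp, bh)]
--         nur_pp += [(d, b, p, "") for p in pp[m:]]
--         nur_bh += [(d, b, "", q) for q in bh[m:]]
--     return nur_pp, nur_bh, uebereinstimmend
-- ===== Notes on version B (the rewrite author's own statement) =====
-- stated objective: alternative
-- what changed: Replaces A's two defaultdict grouping maps by a sorted list of distinct (datum, betrag) keys with per-key filter comprehensions and zip/slice pairing; no dictionaries or index loops are built.
import Mathlib
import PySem

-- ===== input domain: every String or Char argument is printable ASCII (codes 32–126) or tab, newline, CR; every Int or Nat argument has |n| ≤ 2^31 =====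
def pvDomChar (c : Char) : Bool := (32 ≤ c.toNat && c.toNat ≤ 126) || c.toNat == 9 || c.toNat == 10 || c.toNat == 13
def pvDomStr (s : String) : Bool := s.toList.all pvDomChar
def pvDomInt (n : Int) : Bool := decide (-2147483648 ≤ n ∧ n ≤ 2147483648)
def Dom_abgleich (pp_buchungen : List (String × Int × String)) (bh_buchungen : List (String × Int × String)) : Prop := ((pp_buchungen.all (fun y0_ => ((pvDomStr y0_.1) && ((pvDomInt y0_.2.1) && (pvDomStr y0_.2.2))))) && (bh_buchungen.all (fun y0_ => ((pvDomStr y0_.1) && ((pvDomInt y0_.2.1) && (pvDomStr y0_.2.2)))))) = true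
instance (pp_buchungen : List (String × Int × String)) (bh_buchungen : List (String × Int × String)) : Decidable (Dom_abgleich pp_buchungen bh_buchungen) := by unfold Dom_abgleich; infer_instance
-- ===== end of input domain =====

-- B replaces A's defaultdict grouping by a sorted distinct-key list with per-key
-- filter comprehensions and zip/slice pairing (objective: alternative, same cost class).

-- ===== PORT A =====
-- 'pp_map[(datum, betrag)].append(betreff)' on a defaultdict(list):
-- d.modify key [] (· ++ [betreff])  (d[key] = d.get(key, []) + [betreff])
def pvGroup (xs : List (String × Int × String)) : PySem.Dict (String × Int) (List String) :=
  xs.foldl (fun d t => d.modify (t.1, t.2.1) [] (· ++ [t.2.2])) PySem.Dict.empty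

def abgleich (pp_buchungen : List (String × Int × String)) (bh_buchungen : List (String × Int × String)) : (List (String × Int × String × String)) × (List (String × Int × String × String)) × (List (String × Int × String × String)) :=
  let pp_map := pvGroup pp_buchungen
  let bh_map := pvGroup bh_buchungen
  let alle_keys := PySem.Set.union (PySem.Set.ofList pp_map.keys) (PySem.Set.ofList bh_map.keys)
  -- sorted(alle_keys): tuple keys, so sorted2 with the two components
  let res := (PySem.List.sorted2 alle_keys (·.1) (·.2)).foldl
    (fun acc key =>
      let pp_liste := pp_map.getD key []
      let bh_liste := bh_map.getD key []
      let anzahl_match : Int := min (PySem.List.len pp_liste) (PySem.List.len bh_liste)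
      -- the three index loops; indices are in range, so pyGetD _ _ "" is exact Python indexing
      let ueb := (PySem.List.pyRange 0 anzahl_match).foldl
        (fun u i => u ++ [(key.1, key.2, PySem.List.pyGetD pp_liste i "", PySem.List.pyGetD bh_liste i "")]) acc.2.2
      let np := (PySem.List.pyRange anzahl_match (PySem.List.len pp_liste)).foldl
        (fun u i => u ++ [(key.1, key.2, PySem.List.pyGetD pp_liste i "", "")]) acc.1
      let nb := (PySem.List.pyRange anzahl_match (PySem.List.len bh_liste)).foldl
        (fun u i => u ++ [(key.1, key.2, "", PySem.List.pyGetD bh_liste i "")]) acc.2.1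
      (np, nb, ueb)) ([], [], [])
  res

-- ===== PORT B =====
def abgleich_alt (pp_buchungen : List (String × Int × String)) (bh_buchungen : List (String × Int × String)) : (List (String × Int × String × String)) × (List (String × Int × String × String)) × (List (String × Int × String × String)) :=
  let keys := PySem.List.sorted2
    (PySem.Set.union (PySem.Set.ofList (pp_buchungen.map (fun t => (t.1, t.2.1))))
                     (PySem.Set.ofList (bh_buchungen.map (fun t => (t.1, t.2.1)))))
    (·.1) (·.2)
  keys.foldl
    (fun acc k =>
      let pp := (pp_buchungen.filter (fun t => (t.1, t.2.1) == k)).map (fun t => t.2.2)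
      let bh := (bh_buchungen.filter (fun t => (t.1, t.2.1) == k)).map (fun t => t.2.2)
      let m := min pp.length bh.length
      -- pp[m:] with 0 ≤ m is List.drop m (exact)
      (acc.1 ++ (pp.drop m).map (fun p => (k.1, k.2, p, "")),
       acc.2.1 ++ (bh.drop m).map (fun q => (k.1, k.2, "", q)),
       acc.2.2 ++ (pp.zip bh).map (fun pq => (k.1, k.2, pq.1, pq.2))))
    ([], [], [])

-- ===== PRECONDITION & SPEC =====
def Spec_abgleich (pp_buchungen : List (String × Int × String)) (bh_buchungen : List (String × Int × String)) (out : (List (String × Int × String × String)) × (List (String × Int × String × String)) × (List (String × Int × String × String))) : Prop := out = abgleich_alt pp_buchungen bh_buchungen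
instance (pp_buchungen : List (String × Int × String)) (bh_buchungen : List (String × Int × String)) (out : (List (String × Int × String × String)) × (List (String × Int × String × String)) × (List (String × Int × String × String))) : Decidable (Spec_abgleich pp_buchungen bh_buchungen out) := by
  unfold Spec_abgleich
  have h : DecidableEq (List (String × Int × String × String)) := inferInstance
  exact instDecidableEqProd out (abgleich_alt pp_buchungen bh_buchungen)

-- ===== CLAIM (what is proved, stated in full; the proofs are below) =====
def Claim_equal_abgleich : Prop := ∀ (pp_buchungen : List (String × Int × String)) (bh_buchungen : List (String × Int × String)), Dom_abgleich pp_buchungen bh_buchungen → Spec_abgleich pp_buchungen bh_buchungen (abgleich pp_buchungen bh_buchungen)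

-- ===== LEMMAS AND PROOFS =====

-- generic fold of the grouping step over an arbitrary starting dict
theorem pvGroup_getD_aux (xs : List (String × Int × String))
    (d : PySem.Dict (String × Int) (List String)) (k : String × Int) :
    (xs.foldl (fun d t => d.modify (t.1, t.2.1) [] (· ++ [t.2.2])) d).getD k []
      = d.getD k [] ++ (xs.filter (fun t => (t.1, t.2.1) == k)).map (fun t => t.2.2) := by
  induction xs generalizing d with
  | nil => simp
  | cons t xs ih =>
    simp only [List.foldl_cons, List.filter_cons]
    rw [ih, PySem.Dict.getD_modify]
    by_cases h : k = (t.1, t.2.1)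
    · simp [h, List.append_assoc]
    · have h' : ((t.1, t.2.1) == k) = false := by
        simpa using fun hc => h hc.symm
      simp [h, h']

-- the grouping dict's value at k is exactly the filter-comprehension B uses
theorem pvGroup_getD (xs : List (String × Int × String)) (k : String × Int) :
    (pvGroup xs).getD k [] = (xs.filter (fun t => (t.1, t.2.1) == k)).map (fun t => t.2.2) := by
  simpa [PySem.Dict.getD_empty] using pvGroup_getD_aux xs PySem.Dict.empty k

theorem pvGroup_keys_aux (xs : List (String × Int × String))
    (d : PySem.Dict (String × Int) (List String)) :
    (xs.foldl (fun d t => d.modify (t.1, t.2.1) [] (· ++ [t.2.2])) d).keys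
      = PySem.Set.update d.keys (xs.map (fun t => (t.1, t.2.1))) := by
  induction xs generalizing d with
  | nil => simp [PySem.Set.update_nil]
  | cons t xs ih =>
    simp only [List.foldl_cons, List.map_cons]
    rw [ih, PySem.Set.update_cons]
    congr 1
    rw [PySem.Dict.keys_modify]
    by_cases h : d.contains (t.1, t.2.1) = true
    · rw [PySem.Dict.keys_insert_of_contains _ _ h,
        PySem.Set.add_of_mem ((PySem.Dict.contains_iff_mem_keys _ _).1 h)]
    · have h' : d.contains (t.1, t.2.1) = false := by simpa using h
      rw [PySem.Dict.keys_insert_of_not_contains _ _ h',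
        PySem.Set.add_of_not_mem (fun hm => h ((PySem.Dict.contains_iff_mem_keys _ _).2 hm))]

-- the grouping dict's keys are B's distinct-key set
theorem pvGroup_keys (xs : List (String × Int × String)) :
    (pvGroup xs).keys = PySem.Set.ofList (xs.map (fun t => (t.1, t.2.1))) := by
  rw [pvGroup, pvGroup_keys_aux, PySem.Dict.keys_empty, PySem.Set.update_nil_left]

theorem pv_pyRange_natCast (m n : Nat) :
    PySem.List.pyRange (m : Int) (n : Int)
      = (List.range (n - m)).map (fun k => ((m + k : Nat) : Int)) := by
  simp only [PySem.List.pyRange]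
  norm_num
  by_cases h : m < n
  · rw [if_pos h]
  · rw [if_neg h, Nat.sub_eq_zero_of_le (Nat.le_of_not_lt h)]

theorem pv_map_getD_drop {α : Type} (xs : List α) (d : α) (m : Nat) (h : m ≤ xs.length) :
    (List.range (xs.length - m)).map (fun k => xs.getD (m + k) d) = xs.drop m := by
  apply List.ext_getElem
  · simp
  · intro i h1 h2
    simp only [List.getElem_map, List.getElem_range, List.getElem_drop]
    have hi : m + i < xs.length := by
      simp only [List.length_map, List.length_range] at h1
      omega
    rw [List.getD_eq_getElem _ _ hi]

theorem pv_map_range_zip (a : String) (b : Int) (xs ys : List String) :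
    (List.range (min xs.length ys.length)).map (fun i => (a, b, xs.getD i "", ys.getD i ""))
      = (xs.zip ys).map (fun pq => (a, b, pq.1, pq.2)) := by
  apply List.ext_getElem
  · simp
  · intro i h1 h2
    simp only [List.length_map, List.length_range] at h1
    have hx : i < xs.length := by omega
    have hy : i < ys.length := by omega
    simp only [List.getElem_map, List.getElem_range, List.getElem_zip]
    rw [List.getD_eq_getElem _ _ hx, List.getD_eq_getElem _ _ hy]

theorem pv_np (a : String) (b : Int) (xs : List String) (M : Nat) (h : M ≤ xs.length) :
    (List.range (xs.length - M)).map (fun j => (a, b, xs.getD (M + j) "", ""))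
      = (xs.drop M).map (fun p => (a, b, p, "")) := by
  rw [← pv_map_getD_drop xs "" M h, List.map_map]
  rfl

theorem pv_nb (a : String) (b : Int) (xs : List String) (M : Nat) (h : M ≤ xs.length) :
    (List.range (xs.length - M)).map (fun j => (a, b, "", xs.getD (M + j) ""))
      = (xs.drop M).map (fun q => (a, b, "", q)) := by
  rw [← pv_map_getD_drop xs "" M h, List.map_map]
  rfl

-- ===== VERDICT (by name: the statement is the Claim_ definition above) =====
theorem abgleich_spec : Claim_equal_abgleich := by
  intro pp bh _hdom
  unfold Spec_abgleich
  simp only [abgleich, abgleich_alt]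
  rw [pvGroup_keys pp, pvGroup_keys bh, PySem.Set.ofList_ofList, PySem.Set.ofList_ofList]
  apply PySem.List.foldl_congr_mem
  intro acc k _hk
  rw [pvGroup_getD pp k, pvGroup_getD bh k]
  set pl := (pp.filter (fun t => (t.1, t.2.1) == k)).map (fun t => t.2.2) with hpl
  set bl := (bh.filter (fun t => (t.1, t.2.1) == k)).map (fun t => t.2.2) with hbl
  have hm : min (PySem.List.len pl) (PySem.List.len bl) = ((min pl.length bl.length : Nat) : Int) := by
    simp [PySem.List.len, Nat.cast_min]
  rw [hm]
  have hlp : PySem.List.len pl = ((pl.length : Nat) : Int) := rfl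
  have hlb : PySem.List.len bl = ((bl.length : Nat) : Int) := rfl
  rw [hlp, hlb]
  simp only [PySem.List.foldl_append_singleton_eq_map]
  rw [pv_pyRange_natCast, pv_pyRange_natCast]
  have h0 : ((0 : Nat) : Int) = (0 : Int) := rfl
  rw [← h0, pv_pyRange_natCast 0 (min pl.length bl.length)]
  simp only [List.map_map, Function.comp_def, PySem.List.pyGetD_natCast, Nat.zero_add, Nat.sub_zero]
  rw [pv_np k.1 k.2 pl _ (Nat.min_le_left _ _), pv_nb k.1 k.2 bl _ (Nat.min_le_right _ _),
    pv_map_range_zip k.1 k.2 pl bl]
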